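-- pv_equiv track=rewrite | github.com/chw0912/CodingTest | 프로그래머스/lv2/42885. 구명보트/구명보트.py | solution
-- ===== SOURCE A (Python) =====
-- from collections import deque
--
-- def solution(people, limit):
--     people = sorted(people)
--     dq=deque(people)
--     cnt=0
--
--     while dq:
--         escape_L = dq.popleft()
--
--         while dq:
--             escape_R=dq.pop()
--             if escape_L + escape_R > limit:
--                 cnt+=1
--             else:
--                 break
--         cnt += 1
--
--     return cnt
-- ===== SOURCE B (Python) =====
-- def solution(people, limit):
--     ppl = sorted(people)
--     left, right = 0, len(ppl) - 1
--     cnt = 0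
--     while left <= right:
--         cnt += 1
--         if ppl[left] + ppl[right] <= limit:
--             left += 1
--         right -= 1
--     return cnt
-- ===== Notes on version B (the rewrite author's own statement) =====
-- stated objective: idiomatic
-- what changed: Replaced the deque with nested pop-loops by the standard flat two-pointer greedy over the sorted list: one loop, index pointers, no container mutation.
import Mathlib
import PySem

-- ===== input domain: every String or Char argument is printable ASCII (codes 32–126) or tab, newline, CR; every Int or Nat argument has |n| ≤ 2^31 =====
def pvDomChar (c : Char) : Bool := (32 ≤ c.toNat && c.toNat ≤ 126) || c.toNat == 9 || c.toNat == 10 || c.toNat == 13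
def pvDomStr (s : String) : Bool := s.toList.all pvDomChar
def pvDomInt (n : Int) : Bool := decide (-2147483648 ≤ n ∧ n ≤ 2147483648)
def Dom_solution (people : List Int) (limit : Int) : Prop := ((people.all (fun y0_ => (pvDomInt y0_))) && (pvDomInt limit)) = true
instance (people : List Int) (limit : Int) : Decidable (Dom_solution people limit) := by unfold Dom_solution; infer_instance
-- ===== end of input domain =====

-- B replaces A's deque with nested pop-loops by the standard flat two-pointer greedy (idiomatic; same return value).

-- ===== PORT A =====
-- inner 'while dq: escape_R = dq.pop(); if escape_L + escape_R > limit: cnt += 1 else: break'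
def solInner (escL limit : Int) (dq : List Int) (cnt : Int) : List Int × Int :=
  match dq with
  | [] => ([], cnt)
  | x :: xs =>
    if escL + (x :: xs).getLast (List.cons_ne_nil x xs) > limit
    then solInner escL limit (x :: xs).dropLast (cnt + 1)
    else ((x :: xs).dropLast, cnt)
termination_by dq.length
decreasing_by simp

-- the inner loop only removes elements from the deque (needed for outer-loop termination)
lemma solInner_length_le (escL limit : Int) (dq : List Int) (cnt : Int) :
    (solInner escL limit dq cnt).1.length ≤ dq.length := by
  fun_induction solInner escL limit dq cnt with
  | case1 => simp
  | case2 x xs cnt h ih => exact le_trans ih (by simp)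
  | case3 x xs cnt h => simp

-- outer 'while dq: escape_L = dq.popleft(); <inner>; cnt += 1'
def solOuter (limit : Int) (dq : List Int) (cnt : Int) : Int :=
  match dq with
  | [] => cnt
  | l :: rest =>
    let p := solInner l limit rest cnt
    solOuter limit p.1 (p.2 + 1)
termination_by dq.length
decreasing_by exact Nat.lt_succ_of_le (solInner_length_le _ _ _ _)

def solution (people : List Int) (limit : Int) : Int :=
  let ppl := PySem.List.sorted people (fun x => x) false
  solOuter limit ppl 0

-- ===== PORT B =====
-- 'while left <= right: cnt += 1; if ppl[left] + ppl[right] <= limit: left += 1; right -= 1'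
-- (indices are always in range while the loop runs, so pyGetD with default 0 is exact)
def altLoop (ppl : List Int) (limit left right cnt : Int) : Int :=
  if left ≤ right then
    altLoop ppl limit
      (if PySem.List.pyGetD ppl left 0 + PySem.List.pyGetD ppl right 0 ≤ limit then left + 1 else left)
      (right - 1) (cnt + 1)
  else cnt
termination_by (right + 1 - left).toNat
decreasing_by split <;> omega

def solution_alt (people : List Int) (limit : Int) : Int :=
  let ppl := PySem.List.sorted people (fun x => x) false
  altLoop ppl limit 0 ((ppl.length : Int) - 1) 0

-- ===== PRECONDITION & SPEC =====
def Spec_solution (people : List Int) (limit : Int) (out : Int) : Prop := out = solution_alt people limit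
instance (people : List Int) (limit : Int) (out : Int) : Decidable (Spec_solution people limit out) := by unfold Spec_solution; infer_instance

-- ===== CLAIM (what is proved, stated in full; the proofs are below) =====
def Claim_equal_solution : Prop := ∀ (people : List Int) (limit : Int), Dom_solution people limit → Spec_solution people limit (solution people limit)

-- ===== LEMMAS AND PROOFS =====

-- common characterisation: number of boats for a deque, removing one or two people from its ends per boat
def boats (limit : Int) (dq : List Int) : Int :=
  match dq with
  | [] => 0
  | [_] => 1
  | l :: x :: xs =>
    if l + (x :: xs).getLast (List.cons_ne_nil x xs) ≤ limit
    then 1 + boats limit (x :: xs).dropLast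
    else 1 + boats limit (l :: (x :: xs).dropLast)
termination_by dq.length
decreasing_by all_goals simp

lemma boats_cons_concat (limit l r : Int) (mid : List Int) :
    boats limit (l :: (mid ++ [r])) =
      if l + r ≤ limit then 1 + boats limit mid else 1 + boats limit (l :: mid) := by
  obtain ⟨a, as, hm⟩ := List.exists_cons_of_ne_nil
    (List.append_ne_nil_of_right_ne_nil mid (by simp : ([r] : List Int) ≠ []))
  have h1 : (a :: as).getLast (List.cons_ne_nil a as) = r := by
    have := List.getLast_concat (l := mid) (a := r)
    simp only [← hm] at this ⊢
    exact this
  have h2 : (a :: as).dropLast = mid := by rw [← hm]; exact List.dropLast_concat ..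
  rw [hm, boats, h1, h2]

lemma solInner_concat (escL limit r : Int) (mid : List Int) (cnt : Int) :
    solInner escL limit (mid ++ [r]) cnt =
      if escL + r > limit then solInner escL limit mid (cnt + 1) else (mid, cnt) := by
  obtain ⟨a, as, hm⟩ := List.exists_cons_of_ne_nil
    (List.append_ne_nil_of_right_ne_nil mid (by simp : ([r] : List Int) ≠ []))
  have h1 : (a :: as).getLast (List.cons_ne_nil a as) = r := by
    have := List.getLast_concat (l := mid) (a := r)
    simp only [← hm] at this ⊢
    exact this
  have h2 : (a :: as).dropLast = mid := by rw [← hm]; exact List.dropLast_concat ..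
  rw [hm, solInner, h1, h2]

lemma solOuter_cons (limit l : Int) (rest : List Int) (cnt : Int) :
    solOuter limit (l :: rest) cnt =
      solOuter limit (solInner l limit rest cnt).1 ((solInner l limit rest cnt).2 + 1) := by
  rw [solOuter]

lemma solOuter_eq_boats (limit : Int) :
    ∀ (n : ℕ) (dq : List Int), dq.length ≤ n → ∀ cnt, solOuter limit dq cnt = cnt + boats limit dq := by
  intro n
  induction n with
  | zero =>
    intro dq h cnt
    have : dq = [] := by cases dq <;> simp_all
    subst this
    rw [solOuter, boats]; ring
  | succ n ih =>
    intro dq h cnt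
    match dq with
    | [] => rw [solOuter, boats]; ring
    | l :: rest =>
      cases hr : rest.getLast? with
      | none =>
        have : rest = [] := List.getLast?_eq_none_iff.mp hr
        subst this
        rw [solOuter_cons, solInner]
        show solOuter limit [] (cnt + 1) = cnt + boats limit [l]
        rw [solOuter, boats]
      | some r =>
        have hne : rest ≠ [] := by intro hn; subst hn; simp at hr
        have hm : rest = rest.dropLast ++ [r] := by
          have := List.getLast?_eq_some_getLast hne
          rw [hr] at this
          conv_lhs => rw [← List.dropLast_concat_getLast hne]
          rw [Option.some_inj.mp this]
        set mid := rest.dropLast with hmid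
        rw [hm] at h ⊢
        rw [solOuter_cons, solInner_concat, boats_cons_concat]
        simp only [List.length_cons, List.length_append] at h
        by_cases hlr : l + r ≤ limit
        · rw [if_neg (by omega), if_pos hlr]
          rw [ih mid (by omega) (cnt + 1)]
          ring
        · rw [if_pos (by omega), if_neg hlr]
          rw [← solOuter_cons]
          rw [ih (l :: mid) (by simp only [List.length_cons]; omega) (cnt + 1)]
          ring

lemma altLoop_eq_boats (ppl : List Int) (limit : Int) :
    ∀ (N : ℕ) (left right cnt : Int), 0 ≤ left → right < (ppl.length : Int) →
      (right + 1 - left).toNat = N →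
      altLoop ppl limit left right cnt =
        cnt + boats limit ((ppl.drop left.toNat).take (right + 1 - left).toNat) := by
  intro N
  induction N using Nat.strong_induction_on with
  | _ N ih =>
    intro left right cnt hl hr hN
    by_cases hlr : left ≤ right
    · -- loop body runs
      have hmlen : right.toNat < ppl.length := by omega
      rw [altLoop, if_pos hlr]
      rw [PySem.List.pyGetD_eq_getElem ppl 0 hl (by omega),
          PySem.List.pyGetD_eq_getElem ppl 0 (by omega : (0:Int) ≤ right) (by omega)]
      by_cases heq : left.toNat = right.toNat
      · -- single element left in the window
        have hsub : (ppl.drop left.toNat).take (right + 1 - left).toNat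
            = [ppl[left.toNat]'(by omega)] := by
          have h1 : (right + 1 - left).toNat = 1 := by omega
          rw [h1, List.drop_eq_getElem_cons (by omega : left.toNat < ppl.length)]
          rfl
        rw [hsub, boats]
        split
        · rw [altLoop, if_neg (by omega)]
        · rw [altLoop, if_neg (by omega)]
      · -- at least two elements in the window
        have hkm' : left.toNat < right.toNat := by omega
        set k := left.toNat with hk
        set m := right.toNat with hmm
        have hdrop : ppl.drop k = ppl[k]'(by omega) :: ppl.drop (k + 1) :=
          List.drop_eq_getElem_cons (by omega)
        -- tail of the window, with its last element split off
        have htail : (ppl.drop (k + 1)).take (m - k)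
            = ((ppl.drop (k + 1)).take (m - k - 1)) ++ [ppl[m]'hmlen] := by
          have h2 : (ppl.drop (k + 1)).drop (m - k - 1) = ppl.drop m := by
            rw [List.drop_drop]; congr 1; omega
          have h3 : (ppl.drop m).take 1 = [ppl[m]'hmlen] := by
            rw [List.drop_eq_getElem_cons hmlen]
            rfl
          calc (ppl.drop (k + 1)).take (m - k)
              = (ppl.drop (k + 1)).take ((m - k - 1) + 1) := by congr 1; omega
            _ = (ppl.drop (k + 1)).take (m - k - 1) ++ ((ppl.drop (k + 1)).drop (m - k - 1)).take 1 := by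
                rw [List.take_add]
            _ = _ := by rw [h2, h3]
        have hwin : (ppl.drop k).take (right + 1 - left).toNat
            = ppl[k]'(by omega) :: (((ppl.drop (k + 1)).take (m - k - 1)) ++ [ppl[m]'hmlen]) := by
          rw [hdrop]
          have h4 : (right + 1 - left).toNat = (m - k) + 1 := by omega
          rw [h4, List.take_succ_cons, htail]
        rw [hwin, boats_cons_concat]
        split
        · -- pair fits: advance both pointers
          rw [ih (right - 1 + 1 - (left + 1)).toNat (by omega) (left + 1) (right - 1) (cnt + 1)
              (by omega) (by omega) rfl]
          have h5 : (right - 1 + 1 - (left + 1)).toNat = m - k - 1 := by omega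
          have h6 : (left + 1).toNat = k + 1 := by omega
          rw [h5, h6]
          ring
        · -- heaviest rides alone
          rw [ih (right - 1 + 1 - left).toNat (by omega) left (right - 1) (cnt + 1)
              hl (by omega) rfl]
          have h5 : (right - 1 + 1 - left).toNat = m - k := by omega
          have h6 : (ppl.drop k).take (m - k)
              = ppl[k]'(by omega) :: (ppl.drop (k + 1)).take (m - k - 1) := by
            rw [hdrop]
            have : m - k = (m - k - 1) + 1 := by omega
            rw [this, List.take_succ_cons]
            norm_num
          rw [h5, h6]
          ring
    · rw [altLoop, if_neg hlr]
      have h0 : (right + 1 - left).toNat = 0 := by omega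
      rw [h0]
      simp [boats]

-- ===== VERDICT (by name: the statement is the Claim_ definition above) =====
theorem solution_spec : Claim_equal_solution := by
  intro people limit _
  unfold Spec_solution solution solution_alt
  set ppl := PySem.List.sorted people (fun x => x) false with hp
  rw [solOuter_eq_boats limit ppl.length ppl (le_refl _) 0]
  rw [altLoop_eq_boats ppl limit ((ppl.length : Int) - 1 + 1 - 0).toNat 0 ((ppl.length : Int) - 1) 0
      (by omega) (by omega) rfl]
  have h : ((ppl.length : Int) - 1 + 1 - 0).toNat = ppl.length := by omega
  rw [h]
  simp
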